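-- pv_equiv track=rewrite | github.com/Organizacao-LES/Indexador-Busca-original | backend/app/services/search_service.py | _deserialize_filters
-- ===== SOURCE A (Python) =====
-- def _deserialize_filters(serialized_filters: str | None) -> dict:
--     filters = {
--         "category": None,
--         "documentType": None,
--         "author": None,
--         "dateFrom": None,
--         "dateTo": None,
--         "sortBy": None,
--     }
--     if not serialized_filters:
--         return filters
--
--     for item in serialized_filters.split(";"):
--         if "=" not in item:
--             continue
--         key, value = item.split("=", 1)
--         if key in filters and value:
--             filters[key] = value
--     return filters
-- ===== SOURCE B (Python) =====
-- def _last_value(items, key):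
--     for item in reversed(items):
--         parts = item.split("=", 1)
--         if len(parts) == 2 and parts[0] == key and parts[1]:
--             return parts[1]
--     return None
--
-- def _deserialize_filters(serialized_filters):
--     items = (serialized_filters or "").split(";")
--     filters = {}
--     for key in ("category", "documentType", "author",
--                 "dateFrom", "dateTo", "sortBy"):
--         filters[key] = _last_value(items, key)
--     return filters
-- ===== Notes on version B (the rewrite author's own statement) =====
-- stated objective: alternative
-- what changed: B inverts the traversal: instead of A's single forward pass updating a defaults dict item by item, B does a per-key backward search over the reversed item list, returning the first (i.e. last-in-string) non-empty value for each of the six keys; correct because A's result for a key is exactly its last non-empty occurrence.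
import Mathlib
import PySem

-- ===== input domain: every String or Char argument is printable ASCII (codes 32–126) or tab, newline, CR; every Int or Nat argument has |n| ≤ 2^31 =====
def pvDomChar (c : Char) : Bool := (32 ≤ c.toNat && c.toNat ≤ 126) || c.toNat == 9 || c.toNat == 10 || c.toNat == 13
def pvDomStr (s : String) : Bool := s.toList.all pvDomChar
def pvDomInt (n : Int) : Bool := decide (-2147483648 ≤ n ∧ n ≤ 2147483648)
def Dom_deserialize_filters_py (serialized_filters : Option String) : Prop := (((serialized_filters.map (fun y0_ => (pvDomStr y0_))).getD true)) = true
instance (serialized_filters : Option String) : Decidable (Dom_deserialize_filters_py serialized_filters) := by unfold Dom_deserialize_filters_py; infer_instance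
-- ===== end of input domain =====

-- B replaces A's forward defaults-dict-updating pass by a per-key backward search over the
-- reversed item list (first match in reverse = last non-empty occurrence).  Objective: alternative.

-- ===== PORT A =====
def deserialize_filters_py (serialized_filters : Option String) : List (String × Option String) :=
  let filters : PySem.Dict String (Option String) :=
    PySem.Dict.ofList [("category", none), ("documentType", none), ("author", none),
                       ("dateFrom", none), ("dateTo", none), ("sortBy", none)]
  match serialized_filters with
  | none => filters.items
  | some s =>
    if s == "" then filters.items
    else
      (((PySem.Str.split? s ";").getD []).foldl
        (fun d item =>
          if PySem.Str.isIn "=" item then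
            match PySem.Str.splitMax? item "=" 1 with
            | some [key, value] =>
                if d.contains key && !(value == "") then d.insert key (some value) else d
            | _ => d
          else d) filters).items

-- ===== PORT B =====
-- helper _last_value: the for-loop with early return over reversed(items) is findSome? on the reverse
def pvLastValue (items : List String) (key : String) : Option String :=
  items.reverse.findSome? (fun item =>
    let parts := (PySem.Str.splitMax? item "=" 1).getD []
    if parts.length == 2 && (parts.getD 0 "" == key) && !(parts.getD 1 "" == "") then
      some (parts.getD 1 "")
    else none)

def pvSixKeys : List String :=
  ["category", "documentType", "author", "dateFrom", "dateTo", "sortBy"]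

def deserialize_filters_py_alt (serialized_filters : Option String) : List (String × Option String) :=
  let items := (PySem.Str.split? (serialized_filters.getD "") ";").getD []
  pvSixKeys.map (fun k => (k, pvLastValue items k))

-- ===== PRECONDITION & SPEC =====
def Spec_deserialize_filters_py (serialized_filters : Option String) (out : List (String × Option String)) : Prop := out = deserialize_filters_py_alt serialized_filters
instance (serialized_filters : Option String) (out : List (String × Option String)) : Decidable (Spec_deserialize_filters_py serialized_filters out) := by unfold Spec_deserialize_filters_py; infer_instance

-- ===== CLAIM (what is proved, stated in full; the proofs are below) =====
def Claim_equal_deserialize_filters_py : Prop := ∀ (serialized_filters : Option String), Dom_deserialize_filters_py serialized_filters → Spec_deserialize_filters_py serialized_filters (deserialize_filters_py serialized_filters)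

-- ===== LEMMAS AND PROOFS =====

-- A's per-item step, named (identical to the lambda in port A).
def pvStepA (d : PySem.Dict String (Option String)) (item : String) : PySem.Dict String (Option String) :=
  if PySem.Str.isIn "=" item then
    match PySem.Str.splitMax? item "=" 1 with
    | some [key, value] =>
        if d.contains key && !(value == "") then d.insert key (some value) else d
    | _ => d
  else d

-- B's per-item test, named (identical to the lambda in pvLastValue).
def pvMatchB (item key : String) : Option String :=
  let parts := (PySem.Str.splitMax? item "=" 1).getD []
  if parts.length == 2 && (parts.getD 0 "" == key) && !(parts.getD 1 "" == "") then
    some (parts.getD 1 "")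
  else none

-- splitOnMax.go with the split budget exhausted returns the remainder as the last piece.
theorem pv_go0 (sep : List Char) (fuel : Nat) (l cur : List Char) (acc : List (List Char)) :
    PySem.Chars.splitOnMax.go sep fuel 0 l cur acc = ((cur.reverse ++ l) :: acc).reverse := by
  cases fuel with
  | zero => simp [PySem.Chars.splitOnMax.go]
  | succ n => cases l with
    | nil => simp [PySem.Chars.splitOnMax.go]
    | cons a t => simp [PySem.Chars.splitOnMax.go]

-- splitOnMax.go with budget 1 and a one-character separator: cut at the first occurrence.
theorem pv_go1 (c : Char) (fuel : Nat) : ∀ (l cur : List Char) (acc : List (List Char)),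
    l.length < fuel →
    PySem.Chars.splitOnMax.go [c] fuel 1 l cur acc =
      if c ∈ l then
        acc.reverse ++ [cur.reverse ++ l.takeWhile (fun a => a != c),
                        (l.dropWhile (fun a => a != c)).tail]
      else acc.reverse ++ [cur.reverse ++ l] := by
  induction fuel with
  | zero => intro l cur acc h; omega
  | succ n ih =>
    intro l cur acc h
    cases l with
    | nil => simp [PySem.Chars.splitOnMax.go]
    | cons a t =>
      by_cases hca : c = a
      · subst hca
        simp only [PySem.Chars.splitOnMax.go, List.isPrefixOf, BEq.rfl, Bool.true_and,
          if_true, if_neg (by omega : ¬(1 = 0))]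
        rw [pv_go0]
        simp
      · have hba : (c == a) = false := by simp [hca]
        have hab : (a != c) = true := by simp [bne]; exact fun h' => hca h'.symm
        simp only [PySem.Chars.splitOnMax.go, List.isPrefixOf, hba, Bool.false_and,
          if_neg (by omega : ¬(1 = 0))]
        rw [ih t (a :: cur) acc (by simpa using Nat.lt_of_succ_lt_succ h)]
        simp [hab, List.mem_cons, hca]

theorem pv_splitMax_mem (item : String) (h : '=' ∈ item.toList) :
    PySem.Str.splitMax? item "=" 1 =
      some [String.ofList (item.toList.takeWhile (fun a => a != '=')),
            String.ofList ((item.toList.dropWhile (fun a => a != '=')).tail)] := by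
  have : PySem.Chars.splitOnMax item.toList ['='] 1 =
      [item.toList.takeWhile (fun a => a != '='), (item.toList.dropWhile (fun a => a != '=')).tail] := by
    rw [PySem.Chars.splitOnMax]
    simp only [if_neg (by omega : ¬(1:Int) < 0), Int.toNat_one]
    rw [pv_go1 '=' (item.toList.length + 1) item.toList [] [] (Nat.lt_succ_self _)]
    simp [h]
  simp [PySem.Str.splitMax?, PySem.Chars.splitMax?, this]

theorem pv_splitMax_not_mem (item : String) (h : '=' ∉ item.toList) :
    PySem.Str.splitMax? item "=" 1 = some [item] := by
  have : PySem.Chars.splitOnMax item.toList ['='] 1 = [item.toList] := by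
    rw [PySem.Chars.splitOnMax]
    simp only [if_neg (by omega : ¬(1:Int) < 0), Int.toNat_one]
    rw [pv_go1 '=' (item.toList.length + 1) item.toList [] [] (Nat.lt_succ_self _)]
    simp [h]
  simp [PySem.Str.splitMax?, PySem.Chars.splitMax?, this]

theorem pv_isIn (item : String) :
    PySem.Str.isIn "=" item = decide ('=' ∈ item.toList) := by
  rw [PySem.Str.isIn_eq, (rfl : "=".toList = ['='])]
  by_cases h : '=' ∈ item.toList
  · have hi : PySem.Chars.isIn ['='] item.toList = true := by
      rw [PySem.Chars.isIn_iff_infix]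
      obtain ⟨s, t, hst⟩ := List.append_of_mem h
      exact ⟨s, t, by rw [hst]; simp⟩
    simp [hi, h]
  · have hi : PySem.Chars.isIn ['='] item.toList = false := by
      rw [PySem.Chars.isIn_eq_false_iff]
      intro hinf
      exact h (hinf.mem (by simp))
    simp [hi, h]

theorem pv_keys_of_map (d : PySem.Dict String (Option String)) (g : String → Option String)
    (h : d.items = pvSixKeys.map (fun k => (k, g k))) : d.keys = pvSixKeys := by
  have hkeys : d.keys = d.items.map Prod.fst := rfl
  rw [hkeys, h, List.map_map]
  rfl

-- one item's effect: A's dict step corresponds to prepending the item's match in front (Option.or).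
theorem pv_step (d : PySem.Dict String (Option String)) (g : String → Option String)
    (x : String) (hinv : d.items = pvSixKeys.map (fun k => (k, g k))) :
    (pvStepA d x).items = pvSixKeys.map (fun k => (k, (pvMatchB x k).or (g k))) := by
  by_cases h : '=' ∈ x.toList
  · unfold pvStepA pvMatchB
    rw [pv_isIn, pv_splitMax_mem x h]
    simp only [decide_eq_true h, if_true, Option.getD_some, List.getD_cons_zero,
      List.getD_cons_succ, List.length_cons, List.length_nil, beq_self_eq_true, Bool.true_and]
    set key := String.ofList (x.toList.takeWhile (fun a => a != '=')) with hkey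
    set value := String.ofList ((x.toList.dropWhile (fun a => a != '=')).tail) with hvalue
    cases hv : (value == "") with
    | true => simpa [hv] using hinv
    | false =>
      simp only [Bool.not_false, Bool.and_true]
      rw [PySem.Dict.contains_eq_decide_mem_keys, pv_keys_of_map d g hinv]
      by_cases hks : key ∈ pvSixKeys
      · simp only [decide_eq_true hks, if_true]
        rw [PySem.Dict.items_insert_of_contains d (some value)
            (by rw [PySem.Dict.contains_eq_decide_mem_keys, pv_keys_of_map d g hinv]; simpa using hks)]
        rw [hinv, List.map_map]
        apply List.map_congr_left
        intro k _
        by_cases hkk : k = key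
        · subst hkk; simp
        · have h1 : (k == key) = false := beq_eq_false_iff_ne.mpr hkk
          have h2 : (key == k) = false := beq_eq_false_iff_ne.mpr (fun h' => hkk h'.symm)
          simp [Function.comp, h1, h2]
      · rw [if_neg (by simpa using hks), hinv]
        apply List.map_congr_left
        intro k hkm
        have h2 : (key == k) = false := beq_eq_false_iff_ne.mpr (fun h' => hks (h' ▸ hkm))
        simp [h2]
  · unfold pvStepA pvMatchB
    rw [pv_isIn, pv_splitMax_not_mem x h]
    rw [if_neg (by simpa using h), hinv]
    apply List.map_congr_left
    intro k _
    simp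

theorem pv_fold : ∀ (L : List String) (d : PySem.Dict String (Option String))
    (g : String → Option String), d.items = pvSixKeys.map (fun k => (k, g k)) →
    (L.foldl pvStepA d).items =
      pvSixKeys.map (fun k => (k, (L.reverse.findSome? (fun item => pvMatchB item k)).or (g k))) := by
  intro L
  induction L with
  | nil => intro d g h; simpa using h
  | cons x xs ih =>
    intro d g h
    rw [List.foldl_cons, ih (pvStepA d x) (fun k => (pvMatchB x k).or (g k)) (pv_step d g x h)]
    apply List.map_congr_left
    intro k _
    rw [List.reverse_cons, List.findSome?_append]
    cases hfx : pvMatchB x k <;> simp [List.findSome?, hfx]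

-- ===== VERDICT (by name: the statement is the Claim_ definition above) =====
theorem deserialize_filters_py_spec : Claim_equal_deserialize_filters_py := by
  intro sf _
  unfold Spec_deserialize_filters_py
  cases sf with
  | none => decide
  | some s =>
    by_cases hs : s = ""
    · subst hs; decide
    · show deserialize_filters_py (some s) = deserialize_filters_py_alt (some s)
      unfold deserialize_filters_py deserialize_filters_py_alt
      simp only [Option.getD_some, if_neg (by simpa using hs : ¬(s == "") = true)]
      have hA : ∀ (L : List String) d, L.foldl
          (fun d item =>
            if PySem.Str.isIn "=" item then
              match PySem.Str.splitMax? item "=" 1 with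
              | some [key, value] =>
                  if d.contains key && !(value == "") then d.insert key (some value) else d
              | _ => d
            else d) d = L.foldl pvStepA d := fun _ _ => rfl
      rw [hA]
      rw [pv_fold _ _ (fun _ => none) (by decide)]
      apply List.map_congr_left
      intro k _
      simp [pvLastValue, pvMatchB]
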